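-- pv_equiv track=rewrite | github.com/zzbyy/udacity | capstone/process.py | clean_head_foot
-- ===== SOURCE A (Python) =====
-- def clean_head_foot(docs):
--     '''
--     Remove header lines except 'Subject' and 'Organization'
--     '''
--     clean_docs = []
--     for doc in docs:
--         head, split, tail = doc.partition('\n\n')
--
--         # clean head
--         clean_head = '\n'.join([line.strip().split(':')[-1]
--                                 for line in head.strip().split('\n')
--                                 if line.strip().split(':')[0]
--                                 in ('Subject', 'Organization')])
--
--         # remove foot
--         splited_tail = tail.strip().split('\n')
--         for i in range(len(splited_tail) - 1, -1, -1):
--             if splited_tail[i] == '' or \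
--                     splited_tail[i].strip('-') == '' or \
--                     splited_tail[i].strip('=') == '' or \
--                     splited_tail[i].strip('#') == '' or \
--                     splited_tail[i].strip('*') == '' or \
--                     splited_tail[i].strip('\n') == '':
--                 break
--         clean_tail = '\n'.join(splited_tail[:i])
--
--         clean_doc = clean_head + '\n' + clean_tail
--         clean_docs.append(clean_doc)
--
--     return clean_docs
-- ===== SOURCE B (Python) =====
-- KEEP = ('Subject', 'Organization')
--
--
-- def _is_separator(line):
--     return line == '' or any(line.strip(c) == '' for c in '-=#*')
--
--
-- def clean_head_foot(docs):
--     '''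
--     Remove header lines except 'Subject' and 'Organization'
--     '''
--     out = []
--     for doc in docs:
--         head, _, tail = doc.partition('\n\n')
--
--         # head: keep Subject/Organization lines, splitting each line once
--         kept = []
--         for line in head.strip().split('\n'):
--             parts = line.strip().split(':')
--             if parts[0] in KEEP:
--                 kept.append(parts[-1])
--
--         # foot: emit everything strictly before the LAST separator line,
--         # without ever computing an index: a pending buffer is flushed to
--         # the emitted output each time a separator is met (so whatever is
--         # still pending at the end — the part after the last separator,
--         # or the whole tail if none — is discarded)
--         emitted = []
--         pending = []
--         for line in tail.strip().split('\n'):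
--             if _is_separator(line):
--                 emitted.extend(pending)
--                 pending = [line]
--             else:
--                 pending.append(line)
--
--         out.append('\n'.join(kept) + '\n' + '\n'.join(emitted))
--     return out
-- ===== Notes on version B (the rewrite author's own statement) =====
-- stated objective: alternative
-- what changed: The foot is no longer cut by computing a separator index and slicing: B never finds an index at all, it streams the tail lines through an emitted/pending buffer pair, flushing pending into emitted at each separator so the segment after the last separator (or the whole tail if none) is simply never emitted; the head keeps only one split per line via a single-pass loop instead of the double-splitting comprehension, and the six-way strip disjunction becomes one is_separator helper.
import Mathlib
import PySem

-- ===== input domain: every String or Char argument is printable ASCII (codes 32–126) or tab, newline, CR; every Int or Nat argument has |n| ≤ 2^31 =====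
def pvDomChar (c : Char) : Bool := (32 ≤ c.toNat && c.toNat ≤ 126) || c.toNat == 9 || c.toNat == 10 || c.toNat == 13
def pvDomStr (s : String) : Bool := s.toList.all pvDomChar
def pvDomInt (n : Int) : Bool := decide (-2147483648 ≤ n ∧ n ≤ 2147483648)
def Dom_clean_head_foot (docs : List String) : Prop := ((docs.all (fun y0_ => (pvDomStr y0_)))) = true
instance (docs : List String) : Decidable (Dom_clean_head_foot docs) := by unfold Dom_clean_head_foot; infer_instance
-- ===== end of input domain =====

-- B replaces A's backward index-scan-then-slice foot cut by an index-free streaming pass with an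
-- emitted/pending buffer pair, and the head's double-splitting comprehension by a single-split loop (alternative).


-- ===== PORT A =====
-- hand-port of str.partition (PySem has none): first occurrence of sep, exact per CPython
def pvPartition (s sep : List Char) : List Char × List Char × List Char :=
  let i := PySem.Chars.find s sep
  if i < 0 then (s, [], [])
  else (PySem.List.slice s none (some i), sep, PySem.List.slice s (some (i + sep.length)) none)

-- split(':') / split('\n') never return [], so [0] / [-1] are headD / getLastD — exact
def pvFirst (l : List (List Char)) : List Char := l.headD []
def pvLast (l : List (List Char)) : List Char := l.getLastD []

def pvIsSepA (s : List Char) : Bool :=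
  s == [] || PySem.Chars.stripChars s ['-'] == [] || PySem.Chars.stripChars s ['='] == [] ||
    PySem.Chars.stripChars s ['#'] == [] || PySem.Chars.stripChars s ['*'] == [] ||
    PySem.Chars.stripChars s ['\n'] == []

-- A's `for i in range(len-1, -1, -1): if …: break`; after a full loop i is left at 0
def pvFootIdxA (lines : List (List Char)) : Nat → Nat
  | 0 => 0
  | k+1 => if pvIsSepA (lines.getD k []) then k else pvFootIdxA lines k

def pvCleanDocA (doc : List Char) : List Char :=
  let p := pvPartition doc ['\n', '\n']
  let head := p.1
  let tail := p.2.2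
  let cleanHead := PySem.Chars.join ['\n']
    (((PySem.Chars.splitOn (PySem.Chars.strip head) ['\n']).filter
        (fun line =>
          ["Subject".toList, "Organization".toList].contains
            (pvFirst (PySem.Chars.splitOn (PySem.Chars.strip line) [':'])))).map
      (fun line => pvLast (PySem.Chars.splitOn (PySem.Chars.strip line) [':'])))
  let splitedTail := PySem.Chars.splitOn (PySem.Chars.strip tail) ['\n']
  let i := pvFootIdxA splitedTail splitedTail.length
  let cleanTail := PySem.Chars.join ['\n'] (splitedTail.take i)
  cleanHead ++ ['\n'] ++ cleanTail

def clean_head_foot (docs : List String) : List String :=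
  docs.map (fun doc => String.mk (pvCleanDocA doc.toList))

-- ===== PORT B =====
def pvIsSepB (s : List Char) : Bool :=
  s == [] || ['-', '=', '#', '*'].any (fun c => PySem.Chars.stripChars s [c] == [])

-- one streaming step over the tail: (emitted, pending); a separator flushes pending into emitted
def pvFootStep (st : List (List Char) × List (List Char)) (line : List Char) :
    List (List Char) × List (List Char) :=
  if pvIsSepB line then (st.1 ++ st.2, [line]) else (st.1, st.2 ++ [line])

def pvCleanDocB (doc : List Char) : List Char :=
  let p := pvPartition doc ['\n', '\n']
  let head := p.1
  let tail := p.2.2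
  let kept := (PySem.Chars.splitOn (PySem.Chars.strip head) ['\n']).filterMap
    (fun line =>
      let parts := PySem.Chars.splitOn (PySem.Chars.strip line) [':']
      if parts.headD [] == "Subject".toList || parts.headD [] == "Organization".toList then
        some (parts.getLastD [])
      else none)
  let st := (PySem.Chars.splitOn (PySem.Chars.strip tail) ['\n']).foldl pvFootStep ([], [])
  PySem.Chars.join ['\n'] kept ++ ['\n'] ++ PySem.Chars.join ['\n'] st.1

def clean_head_foot_alt (docs : List String) : List String :=
  docs.map (fun doc => String.mk (pvCleanDocB doc.toList))

-- ===== PRECONDITION & SPEC =====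
def Spec_clean_head_foot (docs : List String) (out : List String) : Prop := out = clean_head_foot_alt docs
instance (docs : List String) (out : List String) : Decidable (Spec_clean_head_foot docs out) := by unfold Spec_clean_head_foot; infer_instance

-- ===== CLAIM (what is proved, stated in full; the proofs are below) =====
def Claim_equal_clean_head_foot : Prop := ∀ (docs : List String), Dom_clean_head_foot docs → Spec_clean_head_foot docs (clean_head_foot docs)

-- ===== LEMMAS AND PROOFS =====

-- pieces produced by splitOn on a single-char separator never contain that separator char
theorem pv_splitOn_go_nmem (c : Char) :
    ∀ (fuel : Nat) (l cur : List Char) (acc : List (List Char)),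
      l.length < fuel → (∀ p ∈ acc, c ∉ p) → c ∉ cur →
      ∀ p ∈ PySem.Chars.splitOn.go [c] fuel l cur acc, c ∉ p := by
  intro fuel
  induction fuel with
  | zero => intro l cur acc h; omega
  | succ k ih =>
    intro l cur acc hlen hacc hcur p hp
    match l with
    | [] =>
      simp only [PySem.Chars.splitOn.go] at hp
      simp only [List.mem_reverse, List.mem_cons] at hp
      rcases hp with h | h
      · subst h; simpa using hcur
      · exact hacc _ h
    | a :: rest =>
      simp only [PySem.Chars.splitOn.go] at hp
      by_cases hpre : List.isPrefixOf [c] (a :: rest) = true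
      · rw [if_pos hpre] at hp
        refine ih _ _ _ (by simp at hlen ⊢; omega) ?_ (by simp) p hp
        intro q hq
        rcases List.mem_cons.mp hq with h | h
        · subst h; simpa using hcur
        · exact hacc _ h
      · rw [if_neg hpre] at hp
        have hac : a ≠ c := by
          intro h; subst h
          simp [List.isPrefixOf] at hpre
        refine ih _ _ _ (by simp at hlen ⊢; omega) hacc ?_ p hp
        intro h
        rcases List.mem_cons.mp h with h | h
        · exact hac h.symm
        · exact hcur h

theorem pv_splitOn_nmem (c : Char) (s : List Char) :
    ∀ p ∈ PySem.Chars.splitOn s [c], c ∉ p := by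
  intro p hp
  exact pv_splitOn_go_nmem c (s.length + 1) s [] [] (by omega) (by simp) (by simp) p hp

theorem pv_dropWhile_single (c : Char) (t : List Char) (ht : c ∉ t) :
    List.dropWhile (fun x => List.contains [c] x) t = t := by
  apply List.dropWhile_eq_self_iff.mpr
  intro hl
  have hmem : t[0] ∈ t := List.getElem_mem hl
  simp only [List.contains_cons, List.contains_nil, Bool.or_false]
  intro hbeq
  have : t[0] = c := by simpa [beq_iff_eq] using hbeq
  exact ht (this ▸ hmem)

theorem pv_stripChars_nmem (s : List Char) (c : Char) (h : c ∉ s) :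
    PySem.Chars.stripChars s [c] = s := by
  unfold PySem.Chars.stripChars
  simp only []
  rw [pv_dropWhile_single c s h, pv_dropWhile_single c s.reverse (by simpa using h),
    List.reverse_reverse]

theorem pv_sep_agree (s : List Char) (h : '\n' ∉ s) : pvIsSepA s = pvIsSepB s := by
  unfold pvIsSepA pvIsSepB
  rw [pv_stripChars_nmem s '\n' h]
  cases hs : s.isEmpty <;> simp [hs, Bool.or_assoc]

-- the backward break-scan restricted to a prefix ignores appended elements
theorem pv_footIdx_append (xs : List (List Char)) (x : List Char) :
    ∀ k ≤ xs.length, pvFootIdxA (xs ++ [x]) k = pvFootIdxA xs k := by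
  intro k
  induction k with
  | zero => intro _; rfl
  | succ n ih =>
    intro hle
    have hn : n < xs.length := by omega
    simp only [pvFootIdxA]
    rw [List.getD_append _ _ _ _ hn, ih (by omega)]

theorem pv_footIdx_le (xs : List (List Char)) : ∀ k, pvFootIdxA xs k ≤ k := by
  intro k
  induction k with
  | zero => simp [pvFootIdxA]
  | succ n ih =>
    simp only [pvFootIdxA]
    split
    · omega
    · omega

-- B's streaming fold: the emitted part is exactly A's slice to the last-separator index,
-- and emitted ++ pending reassembles the processed prefix
theorem pv_fold_inv (lines : List (List Char)) (hnl : ∀ p ∈ lines, '\n' ∉ p) :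
    (lines.foldl pvFootStep ([], [])).1 ++ (lines.foldl pvFootStep ([], [])).2 = lines ∧
      (lines.foldl pvFootStep ([], [])).1 = lines.take (pvFootIdxA lines lines.length) := by
  induction lines using List.reverseRecOn with
  | nil => simp
  | append_singleton xs x ih =>
    have hxs : ∀ p ∈ xs, '\n' ∉ p := fun p hp => hnl p (by simp [hp])
    have hx : '\n' ∉ x := hnl x (by simp)
    obtain ⟨ihcat, ihtake⟩ := ih hxs
    rw [List.foldl_append]
    have hgetD : (xs ++ [x]).getD xs.length [] = x := by simp
    have hsep : pvIsSepA x = pvIsSepB x := pv_sep_agree x hx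
    simp only [List.foldl, pvFootStep]
    by_cases hs : pvIsSepB x
    · rw [if_pos hs]
      constructor
      · simp [ihcat]
      · simp only [List.length_append, List.length_cons, List.length_nil, pvFootIdxA, hgetD,
          hsep, hs, if_pos]
        simpa using ihcat
    · rw [if_neg hs]
      constructor
      · simp only []
        rw [← List.append_assoc, ihcat]
      · simp only [List.length_append, List.length_cons, List.length_nil, pvFootIdxA, hgetD,
          hsep, hs, if_neg Bool.false_ne_true]
        rw [pv_footIdx_append xs x xs.length le_rfl, ihtake,
          List.take_append_of_le_length (pv_footIdx_le xs xs.length)]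

-- generic: filter-then-map = one-pass filterMap
theorem pv_filter_map_eq_filterMap {α β : Type} (p : α → Bool) (f : α → β) (l : List α) :
    (l.filter p).map f = l.filterMap (fun x => if p x then some (f x) else none) := by
  induction l with
  | nil => rfl
  | cons a t ih =>
    by_cases h : p a <;> simp [h, ih]

theorem pv_head_eq (head : List Char) :
    ((PySem.Chars.splitOn (PySem.Chars.strip head) ['\n']).filter
        (fun line =>
          ["Subject".toList, "Organization".toList].contains
            (pvFirst (PySem.Chars.splitOn (PySem.Chars.strip line) [':'])))).map
      (fun line => pvLast (PySem.Chars.splitOn (PySem.Chars.strip line) [':']))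
    = (PySem.Chars.splitOn (PySem.Chars.strip head) ['\n']).filterMap
        (fun line =>
          let parts := PySem.Chars.splitOn (PySem.Chars.strip line) [':']
          if parts.headD [] == "Subject".toList || parts.headD [] == "Organization".toList then
            some (parts.getLastD [])
          else none) := by
  rw [pv_filter_map_eq_filterMap]
  apply List.filterMap_congr
  intro line _
  simp only [pvFirst, pvLast, List.contains_cons, List.contains_nil, Bool.or_false]

theorem pv_cleanDoc_eq (doc : List Char) : pvCleanDocA doc = pvCleanDocB doc := by
  simp only [pvCleanDocA, pvCleanDocB]
  rw [pv_head_eq,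
    (pv_fold_inv _ (fun p hp => pv_splitOn_nmem '\n' _ p hp)).2]

-- ===== VERDICT (by name: the statement is the Claim_ definition above) =====
theorem clean_head_foot_spec : Claim_equal_clean_head_foot := by
  intro docs _
  unfold Spec_clean_head_foot clean_head_foot clean_head_foot_alt
  simp only [pv_cleanDoc_eq]
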